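-- pv_equiv track=rewrite | github.com/microsoft/ML-For-Beginners | .venv/Lib/site-packages/pandas/io/formats/format.py | get_level_lengths
-- ===== SOURCE A (Python) =====
-- from typing import (
--     IO,
--     TYPE_CHECKING,
--     Any,
--     Callable,
--     Final,
--     cast,
-- )
--
-- def get_level_lengths(
--     levels: Any, sentinel: bool | object | str = ""
-- ) -> list[dict[int, int]]:
--     """
--     For each index in each level the function returns lengths of indexes.
--
--     Parameters
--     ----------
--     levels : list of lists
--         List of values on for level.
--     sentinel : string, optional
--         Value which states that no new index starts on there.
--
--     Returns
--     -------
--     Returns list of maps. For each level returns map of indexes (key is index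
--     in row and value is length of index).
--     """
--     if len(levels) == 0:
--         return []
--
--     control = [True] * len(levels[0])
--
--     result = []
--     for level in levels:
--         last_index = 0
--
--         lengths = {}
--         for i, key in enumerate(level):
--             if control[i] and key == sentinel:
--                 pass
--             else:
--                 control[i] = False
--                 lengths[last_index] = i - last_index
--                 last_index = i
--
--         lengths[last_index] = len(level) - last_index
--
--         result.append(lengths)
--
--     return result
-- ===== SOURCE B (Python) =====
-- def get_level_lengths(levels, sentinel=""):
--     """Column-major reformulation: precompute, per column, the first level index
--     at which the column is non-sentinel ('depth'); each level's run dict is then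
--     derived independently of the other levels (no mutable control mask)."""
--     if len(levels) == 0:
--         return []
--
--     width = len(levels[0])
--     depth = [
--         next(
--             (k for k, lv in enumerate(levels) if i < len(lv) and lv[i] != sentinel),
--             len(levels),
--         )
--         for i in range(width)
--     ]
--
--     result = []
--     for k, level in enumerate(levels):
--         bounds = [0] + [i for i in range(1, len(level)) if depth[i] <= k]
--         result.append(
--             {b: nb - b for b, nb in zip(bounds, bounds[1:] + [len(level)])}
--         )
--     return result
-- ===== Notes on version B (the rewrite author's own statement) =====
-- stated objective: alternative
-- what changed: B drops A's cross-level mutable boolean control mask and its last_index-threaded incremental dict build: it precomputes, per column, the first level index at which the column is non-sentinel ('depth'), and then derives each level's run dict independently as a zip over the boundary positions {i : depth[i] <= k}.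
import Mathlib
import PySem

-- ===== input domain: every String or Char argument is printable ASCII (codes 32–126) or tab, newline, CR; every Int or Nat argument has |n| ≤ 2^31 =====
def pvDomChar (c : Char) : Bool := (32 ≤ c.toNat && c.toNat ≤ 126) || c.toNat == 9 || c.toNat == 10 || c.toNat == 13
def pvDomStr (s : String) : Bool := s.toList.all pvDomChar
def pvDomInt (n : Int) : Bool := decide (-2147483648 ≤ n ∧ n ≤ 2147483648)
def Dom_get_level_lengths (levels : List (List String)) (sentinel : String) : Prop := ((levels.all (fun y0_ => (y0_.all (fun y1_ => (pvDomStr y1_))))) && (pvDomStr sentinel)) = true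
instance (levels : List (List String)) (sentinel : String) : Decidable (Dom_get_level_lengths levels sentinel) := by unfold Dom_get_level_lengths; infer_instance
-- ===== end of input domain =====

-- B replaces A's cross-level mutable boolean control mask by a precomputed per-column
-- 'sentinel depth' array (first level index at which the column is non-sentinel); each
-- level's run dict is then derived independently of the other levels (objective: alternative).

-- ===== PORT A =====
-- one loop iteration of A's inner 'for i, key in enumerate(level)' (state: control, last_index, lengths)
def stepA (sentinel : String) (s : List Bool × Int × PySem.Dict Int Int) (ik : Int × String) :
    List Bool × Int × PySem.Dict Int Int :=
  let (control, last_index, lengths) := s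
  let (i, key) := ik
  if ((PySem.List.pyGet? control i).getD false) && (key == sentinel) then
    (control, last_index, lengths)
  else
    -- control[i] = False; in-range whenever A did not raise (outside-Pre_ inputs are unconstrained)
    ((PySem.List.pySet? control i false).getD control, i,
      lengths.insert last_index (i - last_index))

def get_level_lengths (levels : List (List String)) (sentinel : String) : List (List (Int × Int)) :=
  if levels.length = 0 then []
  else
    let control := List.replicate (levels.headD []).length true
    let res := levels.foldl
      (fun (acc : List (List (Int × Int)) × List Bool) level =>
        let (result, control) := acc
        let st := (PySem.List.enumerate level 0).foldl (stepA sentinel) (control, (0 : Int), PySem.Dict.empty)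
        let (control, last_index, lengths) := st
        let lengths := lengths.insert last_index ((level.length : Int) - last_index)
        (result ++ [lengths.items], control))
      ([], control)
    res.1

-- ===== PORT B =====
-- the generator condition 'i < len(lv) and lv[i] != sentinel'
def predB (sentinel : String) (i : Int) (lv : List String) : Bool :=
  decide (i < (lv.length : Int)) && !(PySem.List.pyGet? lv i == some sentinel)

-- next((k for k, lv in enumerate(levels) if i < len(lv) and lv[i] != sentinel), len(levels))
def depthAt (levels : List (List String)) (sentinel : String) (i : Int) : Int :=
  match (PySem.List.enumerate levels 0).find? (fun p => predB sentinel i p.2) with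
  | some p => p.1
  | none => (levels.length : Int)

def get_level_lengths_alt (levels : List (List String)) (sentinel : String) : List (List (Int × Int)) :=
  if levels.length = 0 then []
  else
    let width := (levels.headD []).length
    let depth := (PySem.List.pyRange 0 (width : Int) 1).map (fun i => depthAt levels sentinel i)
    (PySem.List.enumerate levels 0).map (fun kl =>
      let bounds := (0 : Int) :: (PySem.List.pyRange 1 (kl.2.length : Int) 1).filter
        (fun i => decide (PySem.List.pyGetD depth i (kl.1 + 1) ≤ kl.1))
      (bounds.zip (bounds.drop 1 ++ [(kl.2.length : Int)])).map (fun p => (p.1, p.2 - p.1)))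

-- ===== PRECONDITION & SPEC =====
-- Pre_ excludes exactly the inputs on which Python A raises IndexError: a level strictly longer
-- than levels[0] makes 'control[i]' go out of range (B's 'depth[i]' raises there too).
def Pre_get_level_lengths (levels : List (List String)) (sentinel : String) : Prop :=
  ∀ l ∈ levels, l.length ≤ (levels.headD []).length
instance (levels : List (List String)) (sentinel : String) : Decidable (Pre_get_level_lengths levels sentinel) := by unfold Pre_get_level_lengths; infer_instance

def pvWitness_get_level_lengths : List (List String) × String :=
  ([["a", "", "b"], ["x", "y", "y"]], "")

def Spec_get_level_lengths (levels : List (List String)) (sentinel : String) (out : List (List (Int × Int))) : Prop := out = get_level_lengths_alt levels sentinel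
instance (levels : List (List String)) (sentinel : String) (out : List (List (Int × Int))) : Decidable (Spec_get_level_lengths levels sentinel out) := by unfold Spec_get_level_lengths; infer_instance

-- ===== CLAIM (what is proved, stated in full; the proofs are below) =====
def Claim_equal_get_level_lengths : Prop := ∀ (levels : List (List String)) (sentinel : String), Dom_get_level_lengths levels sentinel → Pre_get_level_lengths levels sentinel → Spec_get_level_lengths levels sentinel (get_level_lengths levels sentinel)


-- ===== LEMMAS AND PROOFS =====

-- Proof-internal intermediate program: A's inner loop with the dict build replaced by a
-- boundary list (state: bounds, control); it bridges A's fold and B's filter formulation.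
def stepB (sentinel : String) (s : List Int × List Bool) (ik : Int × String) : List Int × List Bool :=
  let (bounds, control) := s
  let (i, key) := ik
  if ((PySem.List.pyGet? control i).getD false) && (key == sentinel) then
    (bounds, control)
  else
    ((if 0 < i then bounds ++ [i] else bounds),
      (PySem.List.pySet? control i false).getD control)

-- consecutive-boundary pairs (b, next - b); pairsInit drops the final (open-ended) pair
def pairsOf : List Int → Int → List (Int × Int)
  | [], _ => []
  | [b], len => [(b, len - b)]
  | b :: b' :: t, len => (b, b' - b) :: pairsOf (b' :: t) len

def pairsInit : List Int → List (Int × Int)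
  | [] => []
  | [_] => []
  | b :: b' :: t => (b, b' - b) :: pairsInit (b' :: t)

lemma zip_eq_pairsOf (bs : List Int) (len : Int) :
    (bs.zip (bs.drop 1 ++ [len])).map (fun p => (p.1, p.2 - p.1)) = pairsOf bs len := by
  induction bs with
  | nil => simp [pairsOf]
  | cons b t ih =>
    cases t with
    | nil => simp [pairsOf]
    | cons b' t' => simpa [pairsOf] using ih

lemma pairsOf_eq (bs : List Int) (h : bs ≠ []) (len : Int) :
    pairsOf bs len = pairsInit bs ++ [(bs.getLast h, len - bs.getLast h)] := by
  induction bs with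
  | nil => simp at h
  | cons b t ih =>
    cases t with
    | nil => simp [pairsOf, pairsInit]
    | cons b' t' => simp [pairsOf, pairsInit, ih]

lemma pairsInit_append (bs : List Int) (h : bs ≠ []) (i : Int) :
    pairsInit (bs ++ [i]) = pairsInit bs ++ [(bs.getLast h, i - bs.getLast h)] := by
  induction bs with
  | nil => simp at h
  | cons b t ih =>
    cases t with
    | nil => simp [pairsInit]
    | cons b' t' => simpa [pairsInit] using ih (by simp)

lemma pairsInit_fst_mem (bs : List Int) (p : Int × Int) (hp : p ∈ pairsInit bs) : p.1 ∈ bs := by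
  induction bs with
  | nil => simp [pairsInit] at hp
  | cons b t ih =>
    cases t with
    | nil => simp [pairsInit] at hp
    | cons b' t' =>
      simp only [pairsInit, List.mem_cons] at hp
      rcases hp with h | h
      · simp [h]
      · exact List.mem_cons_of_mem _ (ih h)

lemma getLast_append_singleton (bs : List Int) (i : Int) (h : bs ++ [i] ≠ []) :
    (bs ++ [i]).getLast h = i := by
  simp

-- main inner-loop invariant: A's fold and the bounds fold over the same enumerated suffix agree
lemma loop_eq (sentinel : String) (ys : List String) :
    ∀ (j last : Int) (ctrl : List Bool) (bs : List Int) (d : PySem.Dict Int Int)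
      (hbs : bs ≠ []),
      0 ≤ last →
      (last < j ∨ (last = j ∧ j = 0 ∧ bs = [0])) →
      bs.getLast hbs = last →
      (∀ b ∈ bs, b ≤ last) →
      (∀ v, (d.insert last v).items = pairsInit bs ++ [(last, v)]) →
      ((PySem.List.enumerate ys j).foldl (stepA sentinel) (ctrl, last, d)).1
        = ((PySem.List.enumerate ys j).foldl (stepB sentinel) (bs, ctrl)).2 ∧
      ∀ len : Int,
        (let st := (PySem.List.enumerate ys j).foldl (stepA sentinel) (ctrl, last, d)
         (st.2.2.insert st.2.1 (len - st.2.1)).items)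
        = pairsOf ((PySem.List.enumerate ys j).foldl (stepB sentinel) (bs, ctrl)).1 len := by
  induction ys with
  | nil =>
    intro j last ctrl bs d hbs h0 hj hlast hble hd
    refine ⟨by simp [PySem.List.enumerate], ?_⟩
    intro len
    simp only [PySem.List.enumerate, List.foldl_nil]
    rw [pairsOf_eq bs hbs len, hlast, hd]
  | cons y ys ih =>
    intro j last ctrl bs d hbs h0 hj hlast hble hd
    rw [PySem.List.enumerate_cons]
    simp only [List.foldl_cons]
    by_cases hc : (((PySem.List.pyGet? ctrl j).getD false) && (y == sentinel)) = true
    · -- continuation: both states unchanged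
      have hA : stepA sentinel (ctrl, last, d) (j, y) = (ctrl, last, d) := by
        simp [stepA, hc]
      have hB : stepB sentinel (bs, ctrl) (j, y) = (bs, ctrl) := by
        simp [stepB, hc]
      rw [hA, hB]
      exact ih (j + 1) last ctrl bs d hbs h0 (by omega) hlast hble hd
    · -- boundary position
      have hA : stepA sentinel (ctrl, last, d) (j, y)
          = ((PySem.List.pySet? ctrl j false).getD ctrl, j, d.insert last (j - last)) := by
        simp [stepA, hc]
      have hB : stepB sentinel (bs, ctrl) (j, y)
          = ((if 0 < j then bs ++ [j] else bs), (PySem.List.pySet? ctrl j false).getD ctrl) := by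
        simp [stepB, hc]
      rw [hA, hB]
      by_cases hjpos : 0 < j
      · -- last < j: a fresh boundary is appended
        have hlt : last < j := by omega
        rw [if_pos hjpos]
        refine ih (j + 1) j _ (bs ++ [j]) (d.insert last (j - last)) (by simp)
          (by omega) (by omega) (getLast_append_singleton bs j _) ?_ ?_
        · intro b hb
          rcases List.mem_append.mp hb with h | h
          · exact le_of_lt (lt_of_le_of_lt (hble b h) hlt)
          · simp at h; omega
        · intro v
          have hni : ((d.insert last (j - last)).contains j) = false := by
            rcases Bool.eq_false_or_eq_true ((d.insert last (j - last)).contains j) with h | h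
            · exfalso
              have hmem : j ∈ (d.insert last (j - last)).keys :=
                (PySem.Dict.contains_iff_mem_keys _ _).mp h
              have hkeys : (d.insert last (j - last)).keys
                  = (pairsInit bs ++ [(last, j - last)]).map (·.1) := by
                simp only [PySem.Dict.keys, hd]
              rw [hkeys] at hmem
              simp only [List.map_append, List.map_cons, List.map_nil, List.mem_append,
                List.mem_map, List.mem_cons, List.not_mem_nil, or_false] at hmem
              rcases hmem with ⟨p, hp, hpe⟩ | hje
              · have := hble _ (pairsInit_fst_mem bs p hp)
                omega
              · omega
            · exact h
          simp only [PySem.Dict.items_insert_of_not_contains _ _ hni, hd,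
            pairsInit_append bs hbs j, hlast, List.append_assoc]
      · -- j = 0 boundary: last = j = 0, bs = [0]; the provisional (0, 0) entry collapses
        have hj0 : j = 0 := by omega
        have hbs0 : bs = [0] := by
          rcases hj with h | ⟨_, _, h⟩
          · omega
          · exact h
        rw [if_neg hjpos]
        refine ih (j + 1) j _ bs (d.insert last (j - last)) hbs (by omega) (by omega)
          (by rw [hlast]; omega) (by intro b hb; rw [hbs0] at hb; simp at hb; omega) ?_
        intro v
        subst hj0
        have hl0' : last = 0 := by omega
        subst hl0'
        rw [PySem.Dict.insert_insert_self, hd v]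

-- per-level agreement of A's fold with the bounds fold, for any control state
lemma level_eq (sentinel : String) (level : List String) (ctrl : List Bool) :
    (let st := (PySem.List.enumerate level 0).foldl (stepA sentinel) (ctrl, (0 : Int), PySem.Dict.empty)
     ((st.2.2.insert st.2.1 ((level.length : Int) - st.2.1)).items, st.1))
    = (let st := (PySem.List.enumerate level 0).foldl (stepB sentinel) ([(0 : Int)], ctrl)
       ((st.1.zip (st.1.drop 1 ++ [((level.length : Int))])).map (fun p => (p.1, p.2 - p.1)), st.2)) := by
  have h := loop_eq sentinel level 0 0 ctrl [0] PySem.Dict.empty (by simp) le_rfl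
    (Or.inr ⟨rfl, rfl, rfl⟩) (by simp) (by simp) ?_
  · rcases h with ⟨hc, hl⟩
    simp only [zip_eq_pairsOf]
    exact Prod.ext (hl _) hc
  · intro v
    rw [PySem.Dict.items_insert_of_not_contains _ _ (PySem.Dict.contains_empty 0)]
    simp [pairsInit, PySem.Dict.empty]

-- the intermediate (bounds-fold) per-level body
def bodyMid (sentinel : String) (acc : List (List (Int × Int)) × List Bool) (level : List String) :
    List (List (Int × Int)) × List Bool :=
  let (result, control) := acc
  let (bounds, control) := (PySem.List.enumerate level 0).foldl (stepB sentinel) ([(0 : Int)], control)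
  let lengths := (bounds.zip (bounds.drop 1 ++ [((level.length : Int))])).map
    (fun p => (p.1, p.2 - p.1))
  (result ++ [lengths], control)

lemma outer_eq (sentinel : String) (levels : List (List String))
    (res : List (List (Int × Int))) (ctrl : List Bool) :
    levels.foldl
      (fun (acc : List (List (Int × Int)) × List Bool) level =>
        let (result, control) := acc
        let st := (PySem.List.enumerate level 0).foldl (stepA sentinel) (control, (0 : Int), PySem.Dict.empty)
        let (control, last_index, lengths) := st
        let lengths := lengths.insert last_index ((level.length : Int) - last_index)
        (result ++ [lengths.items], control)) (res, ctrl)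
    = levels.foldl (bodyMid sentinel) (res, ctrl) := by
  have hfun : (fun (acc : List (List (Int × Int)) × List Bool) level =>
        let (result, control) := acc
        let st := (PySem.List.enumerate level 0).foldl (stepA sentinel) (control, (0 : Int), PySem.Dict.empty)
        let (control, last_index, lengths) := st
        let lengths := lengths.insert last_index ((level.length : Int) - last_index)
        (result ++ [lengths.items], control))
      = bodyMid sentinel := by
    funext acc level
    obtain ⟨r, c⟩ := acc
    have h := level_eq sentinel level c
    simp only at h
    have h1 := congrArg Prod.fst h
    have h2 := congrArg Prod.snd h
    simp only at h1 h2
    unfold bodyMid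
    dsimp only
    rw [h1, h2]
  rw [hfun]

-- ===== depth characterisation =====

lemma depth_enum_aux (sentinel : String) (i : Int) (levels : List (List String)) :
    ∀ s : Int,
      (match (PySem.List.enumerate levels s).find? (fun p => predB sentinel i p.2) with
       | some p => p.1
       | none => s + levels.length)
      = s + (levels.findIdx (predB sentinel i) : Int) := by
  induction levels with
  | nil => intro s; simp [PySem.List.enumerate]
  | cons lv t ih =>
    intro s
    rw [PySem.List.enumerate_cons]
    by_cases h : predB sentinel i lv = true
    · simp [List.findIdx_cons, h]
    · rw [List.find?_cons_of_neg (by simp [h])]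
      have hih := ih (s + 1)
      cases hfind : (PySem.List.enumerate t (s + 1)).find? (fun p => predB sentinel i p.2) with
      | some p =>
        rw [hfind] at hih
        simp only at hih
        dsimp only
        simp only [List.findIdx_cons, h, cond_false]
        push_cast at hih ⊢
        omega
      | none =>
        rw [hfind] at hih
        simp only at hih
        dsimp only
        simp only [List.findIdx_cons, h, cond_false, List.length_cons]
        push_cast at hih ⊢
        linarith

lemma depthAt_eq (levels : List (List String)) (sentinel : String) (i : Int) :
    depthAt levels sentinel i = ((levels.findIdx (predB sentinel i) : Nat) : Int) := by
  have := depth_enum_aux sentinel i levels 0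
  unfold depthAt
  simpa using this

lemma depth_nonneg (levels : List (List String)) (sentinel : String) (i : Int) :
    0 ≤ depthAt levels sentinel i := by
  rw [depthAt_eq]; positivity

lemma depth_eq_pred (levels : List (List String)) (sentinel : String) (i : Int)
    (k : Nat) (hk : k < levels.length) (h : depthAt levels sentinel i = (k : Int)) :
    predB sentinel i (levels[k]) = true := by
  rw [depthAt_eq] at h
  have hfi : levels.findIdx (predB sentinel i) = k := by exact_mod_cast h
  subst hfi
  exact List.findIdx_getElem

lemma depth_gt_pred (levels : List (List String)) (sentinel : String) (i : Int)
    (k : Nat) (hk : k < levels.length) (h : (k : Int) < depthAt levels sentinel i) :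
    predB sentinel i (levels[k]) = false := by
  rw [depthAt_eq] at h
  exact List.not_of_lt_findIdx (by exact_mod_cast h)

lemma predB_natCast (sentinel : String) (j : Nat) (lv : List String) (hj : j < lv.length) :
    predB sentinel (j : Int) lv = !(lv[j] == sentinel) := by
  simp [predB, hj]

-- ===== the control-mask characterisation =====

-- A's control list just before position j of level k: columns already passed carry the
-- next level's threshold
def cmask (levels : List (List String)) (sentinel : String) (width k j : Nat) : List Bool :=
  (List.range width).map
    (fun i => decide ((if i < j then (k : Int) + 1 else (k : Int)) ≤ depthAt levels sentinel i))

lemma cmask_zero (levels : List (List String)) (sentinel : String) (width : Nat) :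
    cmask levels sentinel width 0 0 = List.replicate width true := by
  apply List.ext_getElem
  · simp [cmask]
  · intro i h1 h2
    simp [cmask, depth_nonneg]

lemma cmask_get (levels : List (List String)) (sentinel : String) (width k j : Nat)
    (hj : j < width) :
    PySem.List.pyGet? (cmask levels sentinel width k j) (j : Int)
      = some (decide ((k : Int) ≤ depthAt levels sentinel j)) := by
  rw [PySem.List.pyGet?_natCast]
  simp [cmask, hj]

lemma cmask_set (levels : List (List String)) (sentinel : String) (width k j : Nat)
    (hj : j < width) (hd : depthAt levels sentinel (j : Int) ≤ (k : Int)) :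
    PySem.List.pySet? (cmask levels sentinel width k j) (j : Int) false
      = some (cmask levels sentinel width k (j + 1)) := by
  rw [PySem.List.pySet?_natCast _ _ _ (by simpa [cmask] using hj)]
  congr 1
  apply List.ext_getElem
  · simp [cmask]
  · intro i h1 h2
    simp only [cmask, List.getElem_set, List.getElem_map, List.getElem_range]
    by_cases hij : i = j
    · subst hij
      have hkk : ¬ ((k : Int) + 1 ≤ depthAt levels sentinel (i : Int)) := by omega
      rw [if_pos rfl, if_pos (show i < i + 1 by omega)]
      exact (decide_eq_false hkk).symm
    · simp only [if_neg (Ne.symm hij)]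
      by_cases h3 : i < j
      · simp [h3, show i < j + 1 by omega]
      · simp [h3, show ¬ i < j + 1 by omega]

lemma cmask_stay (levels : List (List String)) (sentinel : String) (width k j : Nat)
    (hd : (k : Int) < depthAt levels sentinel (j : Int)) :
    cmask levels sentinel width k j = cmask levels sentinel width k (j + 1) := by
  apply List.ext_getElem
  · simp [cmask]
  · intro i h1 h2
    simp only [cmask, List.getElem_map, List.getElem_range]
    by_cases hij : i = j
    · subst hij
      have hl : ((k : Int) ≤ depthAt levels sentinel (i : Int)) := by omega
      have hr : ((k : Int) + 1 ≤ depthAt levels sentinel (i : Int)) := by omega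
      split_ifs <;> simp [hl, hr]
    · by_cases h3 : i < j
      · simp [h3, show i < j + 1 by omega]
      · simp [h3, show ¬ i < j + 1 by omega]

lemma cmask_advance (levels : List (List String)) (sentinel : String) (width k len : Nat)
    (hnk : ∀ i : Nat, len ≤ i → i < width → depthAt levels sentinel (i : Int) ≠ (k : Int)) :
    cmask levels sentinel width k len = cmask levels sentinel width (k + 1) 0 := by
  apply List.ext_getElem
  · simp [cmask]
  · intro i h1 h2
    simp only [cmask, List.getElem_map, List.getElem_range]
    push_cast
    by_cases hlt : i < len
    · simp [hlt]
    · have hne := hnk i (by omega) (by simpa [cmask] using h1)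
      simp only [hlt, if_false, Nat.not_lt_zero, if_false]
      have : ((k : Int) ≤ depthAt levels sentinel i) ↔ ((k : Int) + 1 ≤ depthAt levels sentinel i) := by
        omega
      rw [decide_eq_decide.mpr this]

-- ===== the bounds fold equals the filter over the depth array =====

lemma innerB (levels : List (List String)) (sentinel : String) (width k : Nat)
    (hk : k < levels.length) (level : List String) (hlv : levels[k]'hk = level)
    (hlen : level.length ≤ width) :
    ∀ (n j : Nat), level.length - j = n → j ≤ level.length → ∀ (bs : List Int),
      (PySem.List.enumerate (level.drop j) (j : Int)).foldl (stepB sentinel)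
          (bs, cmask levels sentinel width k j)
      = (bs ++ (PySem.List.pyRange (j : Int) (level.length : Int) 1).filter
            (fun i => decide (0 < i) && decide (depthAt levels sentinel i ≤ (k : Int))),
         cmask levels sentinel width k level.length) := by
  intro n
  induction n with
  | zero =>
    intro j hn hj bs
    have hje : j = level.length := by omega
    subst hje
    rw [List.drop_length, PySem.List.pyRange_one_eq_nil (by omega)]
    simp [PySem.List.enumerate]
  | succ n ih =>
    intro j hn hj bs
    have hjlt : j < level.length := by omega
    rw [List.drop_eq_getElem_cons hjlt, PySem.List.enumerate_cons, List.foldl_cons,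
      PySem.List.pyRange_one_cons (by exact_mod_cast hjlt)]
    have hget := cmask_get levels sentinel width k j (by omega)
    by_cases hd : depthAt levels sentinel (j : Int) ≤ (k : Int)
    · -- boundary position: continuation test is false
      have hc : (((PySem.List.pyGet? (cmask levels sentinel width k j) (j : Int)).getD false)
          && (level[j] == sentinel)) = false := by
        rcases lt_or_eq_of_le hd with hlt | heq
        · rw [hget]
          have : ¬ ((k : Int) ≤ depthAt levels sentinel (j : Int)) := by omega
          simp [this]
        · have hp := depth_eq_pred levels sentinel (j : Int) k hk heq
          rw [hlv, predB_natCast sentinel j level hjlt] at hp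
          simp only [Bool.not_eq_true'] at hp
          simp [hp]
      have hstep : stepB sentinel (bs, cmask levels sentinel width k j) ((j : Int), level[j])
          = ((if 0 < (j : Int) then bs ++ [(j : Int)] else bs),
             cmask levels sentinel width k (j + 1)) := by
        simp only [stepB, hc, Bool.false_eq_true, if_false]
        rw [cmask_set levels sentinel width k j (by omega) hd]
        rfl
      rw [hstep]
      have hrec := ih (j + 1) (by omega) (by omega)
        (if 0 < (j : Int) then bs ++ [(j : Int)] else bs)
      push_cast at hrec
      rw [hrec]
      by_cases hj0 : 0 < (j : Int)
      · rw [if_pos hj0, List.filter_cons]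
        simp only [hj0, decide_true, hd, decide_true, Bool.and_self]
        rw [List.append_assoc]
        simp
      · rw [if_neg hj0, List.filter_cons]
        have hj00 : j = 0 := by omega
        subst hj00
        simp
    · -- continuation position
      rw [not_le] at hd
      have hp := depth_gt_pred levels sentinel (j : Int) k hk hd
      rw [hlv, predB_natCast sentinel j level hjlt] at hp
      simp only [Bool.not_eq_false'] at hp
      have hc : (((PySem.List.pyGet? (cmask levels sentinel width k j) (j : Int)).getD false)
          && (level[j] == sentinel)) = true := by
        rw [hget, hp]
        have : ((k : Int) ≤ depthAt levels sentinel (j : Int)) := by omega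
        simp [this]
      have hstep : stepB sentinel (bs, cmask levels sentinel width k j) ((j : Int), level[j])
          = (bs, cmask levels sentinel width k (j + 1)) := by
        simp only [stepB, hc, if_true]
        rw [cmask_stay levels sentinel width k j hd]
      rw [hstep]
      have hrec := ih (j + 1) (by omega) (by omega) bs
      push_cast at hrec
      rw [hrec, List.filter_cons]
      have hnd : ¬ (depthAt levels sentinel (j : Int) ≤ (k : Int)) := by omega
      simp [hnd]

-- the per-level bounds fold produces exactly port B's bounds expression
lemma levelB (levels : List (List String)) (sentinel : String) (width k : Nat)
    (hk : k < levels.length) (level : List String) (hlv : levels[k]'hk = level)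
    (hlen : level.length ≤ width) :
    (PySem.List.enumerate level 0).foldl (stepB sentinel)
        ([(0 : Int)], cmask levels sentinel width k 0)
    = ((0 : Int) :: (PySem.List.pyRange 1 (level.length : Int) 1).filter
          (fun i => decide (PySem.List.pyGetD
            ((PySem.List.pyRange 0 (width : Int) 1).map (fun i => depthAt levels sentinel i))
            i ((k : Int) + 1) ≤ (k : Int))),
       cmask levels sentinel width k level.length) := by
  have h := innerB levels sentinel width k hk level hlv hlen level.length 0 (by omega)
    (by omega) [(0 : Int)]
  simp only [List.drop_zero, Nat.cast_zero] at h
  rw [h]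
  congr 1
  rw [List.singleton_append]
  congr 1
  by_cases h0 : level.length = 0
  · rw [h0]
    have e1 : PySem.List.pyRange 0 (((0 : Nat) : Int)) 1 = [] := PySem.List.pyRange_one_eq_nil (by simp)
    have e2 : PySem.List.pyRange 1 (((0 : Nat) : Int)) 1 = [] := PySem.List.pyRange_one_eq_nil (by simp)
    rw [e1, e2]
    simp
  · rw [PySem.List.pyRange_one_cons (by exact_mod_cast Nat.pos_of_ne_zero h0), List.filter_cons]
    simp only [lt_irrefl, decide_false, Bool.false_and]
    apply List.filter_congr
    intro i hi
    have hmem := (PySem.List.mem_pyRange_one).mp hi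
    have h0i : (0 : Int) < i := by omega
    have hiw : i < (width : Int) := by
      have : i < (level.length : Int) := hmem.2
      omega
    rw [PySem.List.pyGetD_map_pyRange_of_nonneg _ _ _ _ (by omega) hiw]
    simp [h0i]

-- port B's map body
def bodyB (levels : List (List String)) (sentinel : String) (width : Nat)
    (kl : Int × List String) : List (Int × Int) :=
  let bounds := (0 : Int) :: (PySem.List.pyRange 1 (kl.2.length : Int) 1).filter
    (fun i => decide (PySem.List.pyGetD
      ((PySem.List.pyRange 0 (width : Int) 1).map (fun i => depthAt levels sentinel i))
      i (kl.1 + 1) ≤ kl.1))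
  (bounds.zip (bounds.drop 1 ++ [(kl.2.length : Int)])).map (fun p => (p.1, p.2 - p.1))

lemma outerB (levels : List (List String)) (sentinel : String) (width : Nat)
    (hpre : ∀ l ∈ levels, l.length ≤ width) :
    ∀ (suffix : List (List String)) (k : Nat), suffix = levels.drop k →
      ∀ (res : List (List (Int × Int))),
        suffix.foldl (bodyMid sentinel) (res, cmask levels sentinel width k 0)
        = (res ++ (PySem.List.enumerate suffix (k : Int)).map (bodyB levels sentinel width),
           (suffix.foldl (bodyMid sentinel) (res, cmask levels sentinel width k 0)).2) := by
  intro suffix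
  induction suffix with
  | nil => intro k hs res; simp [PySem.List.enumerate]
  | cons lv rest ih =>
    intro k hs res
    have hk : k < levels.length := by
      by_contra hge
      rw [List.drop_eq_nil_of_le (by omega)] at hs
      exact List.cons_ne_nil lv rest hs
    have hlv : levels[k]'hk = lv := by
      have hhd : (levels.drop k).head? = levels[k]? := List.head?_drop ..
      rw [← hs] at hhd
      simp only [List.head?_cons] at hhd
      have h2 : levels[k]? = some lv := hhd.symm
      simpa [List.getElem?_eq_getElem hk] using h2
    have hrest : rest = levels.drop (k + 1) := by
      have htl : (levels.drop k).tail = levels.drop (k + 1) := by rw [List.tail_drop]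
      rw [← hs] at htl
      simpa using htl
    have hlen : lv.length ≤ width := hpre lv (by rw [← hlv]; exact List.getElem_mem hk)
    rw [List.foldl_cons]
    have hbody : bodyMid sentinel (res, cmask levels sentinel width k 0) lv
        = (res ++ [bodyB levels sentinel width ((k : Int), lv)],
           cmask levels sentinel width (k + 1) 0) := by
      unfold bodyMid
      dsimp only
      rw [levelB levels sentinel width k hk lv hlv hlen]
      have hadv : cmask levels sentinel width k lv.length
          = cmask levels sentinel width (k + 1) 0 := by
        apply cmask_advance
        intro i hile hiw hde
        have hp := depth_eq_pred levels sentinel (i : Int) k hk hde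
        rw [hlv] at hp
        simp only [predB, Bool.and_eq_true, decide_eq_true_eq] at hp
        have := hp.1
        omega
      rw [hadv]
      rfl
    rw [hbody]
    rw [PySem.List.enumerate_cons, List.map_cons]
    have hrec := ih (k + 1) hrest (res ++ [bodyB levels sentinel width ((k : Int), lv)])
    push_cast at hrec ⊢
    rw [hrec]
    simp [List.append_assoc]

-- ===== VERDICT (by name: the statements are the Claim_ definitions above) =====
theorem get_level_lengths_spec : Claim_equal_get_level_lengths := by
  intro levels sentinel _ hpre
  unfold Spec_get_level_lengths get_level_lengths get_level_lengths_alt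
  by_cases h : levels.length = 0
  · simp [h]
  · simp only [h, if_false]
    rw [outer_eq]
    have hc0 := (cmask_zero levels sentinel (levels.headD []).length).symm
    rw [hc0]
    have hout := outerB levels sentinel (levels.headD []).length hpre levels 0 (by simp) []
    have h1 := congrArg Prod.fst hout
    simp only [Nat.cast_zero, List.nil_append] at h1
    rw [h1]
    rfl
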